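-- pv_equiv track=rewrite | github.com/cafrii/omega2 | 백준/Gold/14267. 회사 문화 1/회사 문화 1.py | solve
-- ===== SOURCE A (Python) =====
-- def solve(N:int, M, A:list[int], B:list[tuple[int,int]])->list[int]:
--     '''
--         N: 직원 수
--         A[k]: 직원 서열. A[k]는 직원 k+1 의 직속 상사의 번호
--             A[0]: 직원 1(사장)의 상사는 없음. -1
--             A[1]: 직원 2의 상사.
--             A[2]: 직원 3의 상사.
--             ...
--         B: [(n, w), ...],  len(B)=M
--             직원 n이 상사로부터 받은 칭찬이 w
--     '''
--     pr = [0] * (N+1)  # praise map, 칭찬 매핑 표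
--     for n,w in B:
--         pr[n] += w
--         # pr[k]: 직원 k가 받은 칭찬
--
--     dp = [0] * (N+1)
--
--     for j in range(2, N+1):  # j: 2 ~ N. 사장은 제외.
--         jboss = A[j-1]  # 직원 j 의 상사
--         dp[j] = dp[jboss] + pr[j]
--
--     return dp[1:]
-- ===== SOURCE B (Python) =====
-- def solve(N: int, M, A: list[int], B: list[tuple[int, int]]) -> list[int]:
--     # Build the praise map exactly as the original.
--     pr = [0] * (N + 1)
--     for n, w in B:
--         pr[n] += w
--
--     # Cumulative praise of employee j: walk up the boss chain, summing praise.
--     # (The problem guarantees every boss number is smaller than the employee's.)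
--     def total(j):
--         s = 0
--         while j > 1:
--             s += pr[j]
--             j = A[j - 1]
--         return s
--
--     return [total(j) for j in range(1, N + 1)]
-- ===== Notes on version B (the rewrite author's own statement) =====
-- stated objective: alternative
-- what changed: Replaces the sequential dp-array propagation (dp[j] = dp[boss] + pr[j] in index order) by a per-employee climb up the boss chain that sums the praise directly, with no dp memo array.
-- outside the precondition, e.g. on solve(3, 1, [-1, 1, -2], [(2, 7)]): A returns [0, 7, 7], B returns [0, 7, 0]; on solve(2, 1, [-1, 2], [(2, 5)]): A returns [0, 5], B does not finish within the time limit
import Mathlib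
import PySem

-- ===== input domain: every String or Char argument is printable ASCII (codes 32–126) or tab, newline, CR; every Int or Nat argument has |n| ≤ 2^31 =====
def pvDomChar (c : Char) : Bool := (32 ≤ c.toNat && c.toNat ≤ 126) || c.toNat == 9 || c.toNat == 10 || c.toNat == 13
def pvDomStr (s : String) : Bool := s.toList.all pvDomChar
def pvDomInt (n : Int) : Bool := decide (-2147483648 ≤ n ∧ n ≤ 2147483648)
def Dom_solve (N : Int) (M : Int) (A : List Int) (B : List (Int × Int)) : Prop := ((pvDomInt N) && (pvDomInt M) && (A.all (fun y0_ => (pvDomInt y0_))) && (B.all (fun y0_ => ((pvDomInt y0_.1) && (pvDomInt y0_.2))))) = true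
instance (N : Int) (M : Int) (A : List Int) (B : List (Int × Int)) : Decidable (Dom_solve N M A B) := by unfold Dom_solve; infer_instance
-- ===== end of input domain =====

-- B replaces A's sequential dp-array propagation by a direct per-employee climb up the
-- boss chain (objective: alternative algorithm, no dp memo array).

-- ===== PORT A =====
-- pr = [0]*(N+1); for n,w in B: pr[n] += w   (shared by both ports: identical Python lines)
def buildPr (N : Int) (B : List (Int × Int)) : List Int :=
  B.foldl (fun pr nw =>
      PySem.List.pySetD pr nw.1 (PySem.List.pyGetD pr nw.1 0 + nw.2))
    (List.replicate (N + 1).toNat 0)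

def solve (N : Int) (M : Int) (A : List Int) (B : List (Int × Int)) : List Int :=
  let pr := buildPr N B
  let dp := (PySem.List.pyRange 2 (N + 1) 1).foldl (fun dp j =>
      let jboss := PySem.List.pyGetD A (j - 1) 0
      PySem.List.pySetD dp j (PySem.List.pyGetD dp jboss 0 + PySem.List.pyGetD pr j 0))
    (List.replicate (N + 1).toNat 0)
  PySem.List.slice dp (some 1) none

-- ===== PORT B =====
-- while j > 1: s += pr[j]; j = A[j-1]   (fuel only totalizes the while loop; Pre_ bounds the chain by N)
def climbLoop (A : List Int) (pr : List Int) : Nat → Int → Int → Int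
  | 0, _, s => s
  | fuel + 1, j, s =>
    if j > 1 then
      climbLoop A pr fuel (PySem.List.pyGetD A (j - 1) 0) (s + PySem.List.pyGetD pr j 0)
    else s

def solve_alt (N : Int) (M : Int) (A : List Int) (B : List (Int × Int)) : List Int :=
  let pr := buildPr N B
  (PySem.List.pyRange 1 (N + 1) 1).map (fun j => climbLoop A pr N.toNat j 0)

-- ===== PRECONDITION & SPEC =====
-- Pre_ excludes inputs where an index raises in A, and inputs where some employee's boss number
-- is not smaller than his own (the problem guarantees boss < employee): there A's value is an
-- artefact of its left-to-right scan (a not-yet-written dp slot reads as 0) and of negative-index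
-- wraparound, and B's chain climb may not terminate.
def Pre_solve (N : Int) (M : Int) (A : List Int) (B : List (Int × Int)) : Prop :=
  (∀ p ∈ B, -(N + 1) ≤ p.1 ∧ p.1 ≤ N) ∧
  (2 ≤ N → N.toNat ≤ A.length ∧
    (∀ k ∈ List.range N.toNat, 1 ≤ k → (k : Int) - N ≤ A.getD k 0 ∧ A.getD k 0 ≤ (k : Int)))
instance (N : Int) (M : Int) (A : List Int) (B : List (Int × Int)) : Decidable (Pre_solve N M A B) := by unfold Pre_solve; infer_instance

def pvWitness_solve : Int × Int × List Int × (List (Int × Int)) := (3, 1, [-1, 1, 2], [(2, 5)])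

def Spec_solve (N : Int) (M : Int) (A : List Int) (B : List (Int × Int)) (out : List Int) : Prop := out = solve_alt N M A B
instance (N : Int) (M : Int) (A : List Int) (B : List (Int × Int)) (out : List Int) : Decidable (Spec_solve N M A B out) := by unfold Spec_solve; infer_instance

-- ===== CLAIM (what is proved, stated in full; the proofs are below) =====
def Claim_equal_solve : Prop := ∀ (N : Int) (M : Int) (A : List Int) (B : List (Int × Int)), Dom_solve N M A B → Pre_solve N M A B → Spec_solve N M A B (solve N M A B)

-- ===== LEMMAS AND PROOFS =====

-- A's loop body, named for the proofs
def stepA (A : List Int) (pr : List Int) (dp : List Int) (j : Int) : List Int :=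
  PySem.List.pySetD dp j
    (PySem.List.pyGetD dp (PySem.List.pyGetD A (j - 1) 0) 0 + PySem.List.pyGetD pr j 0)

theorem solve_eq (N M : Int) (A : List Int) (B : List (Int × Int)) :
    solve N M A B = PySem.List.slice
      ((PySem.List.pyRange 2 (N + 1) 1).foldl (stepA A (buildPr N B))
        (List.replicate (N + 1).toNat 0)) (some 1) none := rfl

theorem solve_alt_eq (N M : Int) (A : List Int) (B : List (Int × Int)) :
    solve_alt N M A B = (PySem.List.pyRange 1 (N + 1) 1).map
      (fun j => climbLoop A (buildPr N B) N.toNat j 0) := rfl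

theorem getD_replicate_zero (n i : Nat) : (List.replicate n (0:Int)).getD i 0 = 0 := by
  simp [List.getD, List.getElem?_replicate]
  split <;> rfl

theorem climb_acc (A pr : List Int) : ∀ (f : Nat) (j s : Int),
    climbLoop A pr f j s = s + climbLoop A pr f j 0 := by
  intro f
  induction f with
  | zero => intro j s; simp [climbLoop]
  | succ f ih =>
    intro j s
    by_cases h : j > 1
    · simp only [climbLoop, if_pos h]
      rw [ih (PySem.List.pyGetD A (j - 1) 0) (s + PySem.List.pyGetD pr j 0),
        ih (PySem.List.pyGetD A (j - 1) 0) (0 + PySem.List.pyGetD pr j 0)]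
      ring
    · simp [climbLoop, h]

theorem climb_one (A pr : List Int) (f : Nat) : climbLoop A pr f 1 0 = 0 := by
  cases f <;> simp [climbLoop]

theorem climb_le_one (A pr : List Int) (f : Nat) (j s : Int) (h : j ≤ 1) :
    climbLoop A pr f j s = s := by
  cases f with
  | zero => rfl
  | succ f => simp only [climbLoop]; rw [if_neg (by omega)]

theorem boss_bounds (N : Int) (A : List Int)
    (hA : N.toNat ≤ A.length)
    (hb : ∀ k ∈ List.range N.toNat, 1 ≤ k → (k : Int) - N ≤ A.getD k 0 ∧ A.getD k 0 ≤ (k : Int))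
    (j : Int) (h2 : 2 ≤ j) (hjN : j ≤ N) :
    j - 1 - N ≤ PySem.List.pyGetD A (j - 1) 0 ∧ PySem.List.pyGetD A (j - 1) 0 ≤ j - 1 := by
  have hlt : (j - 1).toNat < A.length := by omega
  have hk := hb (j - 1).toNat (List.mem_range.mpr (by omega)) (by omega)
  rw [List.getD_eq_getElem A 0 hlt] at hk
  rw [PySem.List.pyGetD_eq_getElem A 0 (by omega) (by omega)]
  have hcast : (((j - 1).toNat : Nat) : Int) = j - 1 := by omega
  omega

theorem climb_fuel (N : Int) (A pr : List Int)
    (hA : N.toNat ≤ A.length)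
    (hb : ∀ k ∈ List.range N.toNat, 1 ≤ k → (k : Int) - N ≤ A.getD k 0 ∧ A.getD k 0 ≤ (k : Int)) :
    ∀ (n : Nat) (j : Int), 1 ≤ j → j ≤ N → j.toNat ≤ n →
      ∀ (f g : Nat), j ≤ (f : Int) → j ≤ (g : Int) →
        climbLoop A pr f j 0 = climbLoop A pr g j 0 := by
  intro n
  induction n with
  | zero => intro j h1 _ hn; omega
  | succ n ih =>
    intro j h1 hjN hn f g hf hg
    by_cases h2 : 2 ≤ j
    · obtain ⟨f', rfl⟩ : ∃ f', f = f' + 1 := ⟨f - 1, by omega⟩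
      obtain ⟨g', rfl⟩ : ∃ g', g = g' + 1 := ⟨g - 1, by omega⟩
      have hboss := boss_bounds N A hA hb j h2 hjN
      simp only [climbLoop, if_pos (by omega : j > 1)]
      rw [climb_acc A pr f', climb_acc A pr g']
      by_cases hb2 : 2 ≤ PySem.List.pyGetD A (j - 1) 0
      · rw [ih (PySem.List.pyGetD A (j - 1) 0) (by omega) (by omega) (by omega) f' g'
          (by omega) (by omega)]
      · rw [climb_le_one A pr f' _ _ (by omega), climb_le_one A pr g' _ _ (by omega)]
    · have hj1 : j = 1 := by omega
      subst hj1
      rw [climb_one, climb_one]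

theorem climb_rec (N : Int) (A pr : List Int)
    (hA : N.toNat ≤ A.length)
    (hb : ∀ k ∈ List.range N.toNat, 1 ≤ k → (k : Int) - N ≤ A.getD k 0 ∧ A.getD k 0 ≤ (k : Int))
    (j : Int) (h2 : 2 ≤ j) (hjN : j ≤ N) :
    climbLoop A pr N.toNat j 0
      = PySem.List.pyGetD pr j 0
        + climbLoop A pr N.toNat (PySem.List.pyGetD A (j - 1) 0) 0 := by
  obtain ⟨m, hm⟩ : ∃ m, N.toNat = m + 1 := ⟨N.toNat - 1, by omega⟩
  have hboss := boss_bounds N A hA hb j h2 hjN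
  have h1 : climbLoop A pr (m + 1) j 0
      = (0 + PySem.List.pyGetD pr j 0) + climbLoop A pr m (PySem.List.pyGetD A (j - 1) 0) 0 := by
    simp only [climbLoop, if_pos (by omega : j > 1)]
    rw [climb_acc]
  have h2f : climbLoop A pr m (PySem.List.pyGetD A (j - 1) 0) 0
      = climbLoop A pr N.toNat (PySem.List.pyGetD A (j - 1) 0) 0 := by
    by_cases hb2 : 2 ≤ PySem.List.pyGetD A (j - 1) 0
    · exact climb_fuel N A pr hA hb (PySem.List.pyGetD A (j - 1) 0).toNat
        (PySem.List.pyGetD A (j - 1) 0) (by omega) (by omega) (le_refl _) m N.toNat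
        (by omega) (by omega)
    · rw [climb_le_one A pr m _ _ (by omega), climb_le_one A pr N.toNat _ _ (by omega)]
  calc climbLoop A pr N.toNat j 0 = climbLoop A pr (m + 1) j 0 := by rw [hm]
    _ = (0 + PySem.List.pyGetD pr j 0) + climbLoop A pr m (PySem.List.pyGetD A (j - 1) 0) 0 := h1
    _ = PySem.List.pyGetD pr j 0 + climbLoop A pr N.toNat (PySem.List.pyGetD A (j - 1) 0) 0 := by
        rw [h2f]; ring

theorem dp_inv (N : Int) (A pr : List Int) (hN : 1 ≤ N)
    (hA : N.toNat ≤ A.length)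
    (hb : ∀ k ∈ List.range N.toNat, 1 ≤ k → (k : Int) - N ≤ A.getD k 0 ∧ A.getD k 0 ≤ (k : Int)) :
    ∀ (t : Nat), (t : Int) ≤ N - 1 →
      ((PySem.List.pyRange 2 (2 + (t : Int)) 1).foldl (stepA A pr)
          (List.replicate (N + 1).toNat 0)).length = (N + 1).toNat ∧
      ∀ i : Nat, i < (N + 1).toNat →
        ((PySem.List.pyRange 2 (2 + (t : Int)) 1).foldl (stepA A pr)
            (List.replicate (N + 1).toNat 0)).getD i 0
          = if 2 ≤ (i : Int) ∧ (i : Int) < 2 + (t : Int)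
            then climbLoop A pr N.toNat i 0 else 0 := by
  intro t
  induction t with
  | zero =>
    intro _
    have he : PySem.List.pyRange 2 (2 + ((0:Nat) : Int)) 1 = [] := by
      simp
    rw [he]
    refine ⟨by simp, ?_⟩
    intro i hi
    rw [List.foldl_nil, if_neg (by push_cast; omega), getD_replicate_zero]
  | succ t ih =>
    intro ht
    have ht' : (t : Int) ≤ N - 1 := by push_cast at ht ⊢; omega
    obtain ⟨hlen, hval⟩ := ih ht'
    have hsplit : (2 + ((t + 1 : Nat) : Int)) = (2 + (t : Int)) + 1 := by push_cast; ring
    rw [hsplit, PySem.List.pyRange_one_succ_right (by omega), List.foldl_append]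
    set dpt := (PySem.List.pyRange 2 (2 + (t : Int)) 1).foldl (stepA A pr)
      (List.replicate (N + 1).toNat 0) with hdpt
    set j : Int := 2 + (t : Int) with hj
    have h2j : 2 ≤ j := by omega
    have hjN : j ≤ N := by omega
    have hboss := boss_bounds N A hA hb j h2j hjN
    have hv : PySem.List.pyGetD dpt (PySem.List.pyGetD A (j - 1) 0) 0
        = climbLoop A pr N.toNat (PySem.List.pyGetD A (j - 1) 0) 0 := by
      by_cases hbneg : PySem.List.pyGetD A (j - 1) 0 < 0
      · -- Python wraps the negative index to N + 1 + boss ≥ j: that dp slot is still 0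
        rw [climb_le_one A pr N.toNat _ _ (by omega)]
        have hk0 : 0 < (-(PySem.List.pyGetD A (j - 1) 0)).toNat := by omega
        have hkle : (-(PySem.List.pyGetD A (j - 1) 0)).toNat ≤ dpt.length := by omega
        rw [show PySem.List.pyGetD A (j - 1) 0
            = -(((-(PySem.List.pyGetD A (j - 1) 0)).toNat : Nat) : Int) by omega]
        rw [PySem.List.pyGetD_neg_natCast dpt _ 0 hk0 hkle]
        rw [← List.getD_eq_getElem dpt 0 (by omega)]
        rw [hval _ (by omega)]
        rw [if_neg (by omega)]
      · have hbossN : (PySem.List.pyGetD A (j - 1) 0).toNat < (N + 1).toNat := by omega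
        rw [PySem.List.pyGetD_eq_getElem dpt 0 (by omega) (by rw [hlen]; omega)]
        rw [← List.getD_eq_getElem dpt 0
          (by omega : (PySem.List.pyGetD A (j - 1) 0).toNat < dpt.length)]
        rw [hval (PySem.List.pyGetD A (j - 1) 0).toNat hbossN]
        have hcast : (((PySem.List.pyGetD A (j - 1) 0).toNat : Nat) : Int)
            = PySem.List.pyGetD A (j - 1) 0 := by omega
        rw [hcast]
        split_ifs with h
        · rfl
        · rw [climb_le_one A pr N.toNat _ _ (by omega)]
    have hstep : stepA A pr dpt j
        = dpt.set j.toNat (climbLoop A pr N.toNat (PySem.List.pyGetD A (j - 1) 0) 0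
            + PySem.List.pyGetD pr j 0) := by
      rw [stepA, hv, PySem.List.pySetD_of_nonneg dpt _ (by omega)]
    rw [List.foldl_cons, List.foldl_nil, hstep]
    refine ⟨by rw [List.length_set, hlen], ?_⟩
    intro i hi
    have hilen : i < dpt.length := by omega
    rw [List.getD_eq_getElem _ 0 (by rw [List.length_set]; omega), List.getElem_set]
    by_cases hij : j.toNat = i
    · rw [if_pos hij]
      have hij' : (i : Int) = j := by omega
      rw [if_pos (by constructor <;> omega)]
      rw [hij', climb_rec N A pr hA hb j h2j hjN]
      ring
    · rw [if_neg hij, ← List.getD_eq_getElem dpt 0 hilen, hval i hi]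
      have hij' : (i : Int) ≠ j := by omega
      by_cases hc : 2 ≤ (i : Int) ∧ (i : Int) < 2 + (t : Int)
      · rw [if_pos hc, if_pos (by omega)]
      · rw [if_neg hc, if_neg (by omega)]

-- the loop body of A never runs for N ≤ 1: both sides are [] (N ≤ 0) or [0] (N = 1)
theorem solve_spec_small (N M : Int) (A : List Int) (B : List (Int × Int)) (hN2 : ¬ 2 ≤ N) :
    Spec_solve N M A B (solve N M A B) := by
  unfold Spec_solve
  rw [solve_eq, solve_alt_eq]
  have h2 : PySem.List.pyRange 2 (N + 1) 1 = [] := by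
    rw [PySem.List.pyRange_one]
    have : (N + 1 - 2).toNat = 0 := by omega
    rw [this]
    simp
  rw [h2, List.foldl_nil, PySem.List.slice_from_one]
  by_cases hN1 : N = 1
  · subst hN1
    have h1 : PySem.List.pyRange 1 (1 + 1) 1 = [1] := by
      rw [PySem.List.pyRange_one]
      norm_num
    rw [h1]
    norm_num
    rw [climb_one]
    rfl
  · have h1 : PySem.List.pyRange 1 (N + 1) 1 = [] := by
      rw [PySem.List.pyRange_one]
      have : (N + 1 - 1).toNat = 0 := by omega
      rw [this]
      simp
    rw [h1, List.map_nil]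
    have : (N + 1).toNat = 0 ∨ (N + 1).toNat = 1 := by omega
    rcases this with h | h <;> rw [h] <;> rfl

-- ===== VERDICT (by name: the statement is the Claim_ definition above) =====
theorem solve_spec : Claim_equal_solve := by
  intro N M A B _ hpre
  obtain ⟨_, hA2⟩ := hpre
  by_cases hN2 : 2 ≤ N
  case neg => exact solve_spec_small N M A B hN2
  obtain ⟨hA, hb⟩ := hA2 hN2
  have hN : 1 ≤ N := by omega
  unfold Spec_solve
  rw [solve_eq, solve_alt_eq]
  set pr := buildPr N B with hpr
  have hNT : (2 + (((N - 1).toNat : Nat) : Int)) = N + 1 := by omega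
  obtain ⟨hlen, hval⟩ := dp_inv N A pr hN hA hb (N - 1).toNat (by omega)
  rw [hNT] at hlen hval
  set dpF := (PySem.List.pyRange 2 (N + 1) 1).foldl (stepA A pr)
    (List.replicate (N + 1).toNat 0) with hdpF
  rw [PySem.List.slice_from_one, ← List.drop_one]
  apply List.ext_getElem
  · rw [List.length_drop, hlen, List.length_map, PySem.List.length_pyRange_one]
    omega
  · intro i h1 h2
    have hiN : i < N.toNat := by
      have := h1
      rw [List.length_drop, hlen] at this
      omega
    rw [List.getElem_drop, ← List.getD_eq_getElem dpF 0 (by omega), hval (1 + i) (by omega)]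
    rw [List.getElem_map, PySem.List.getElem_pyRange_one]
    by_cases hi0 : i = 0
    · subst hi0
      norm_num [climb_one]
    · rw [if_pos (by push_cast; omega)]
      norm_num
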